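-- pv_equiv track=rewrite | github.com/pypi-data/pypi-mirror-392 | packages/django-cfg/django_cfg-1.5.42.tar.gz/django_cfg-1.5.42/src/django_cfg/apps/business/knowbase/services/archive/chunking/base.py | _find_good_break_point
-- ===== SOURCE A (Python) =====
-- def _find_good_break_point(content: str, start: int, end: int) -> int:
--     """
--     Find good break point for text chunking.
--
--     Tries to break at sentence endings or word boundaries.
--
--     Args:
--         content: Content being chunked
--         start: Start position
--         end: Desired end position
--
--     Returns:
--         Actual break point position
--     """
--     # Look for sentence endings
--     for i in range(end - 1, start, -1):
--         if content[i] in '.!?\n':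
--             return i + 1
--
--     # Look for word boundaries
--     for i in range(end - 1, start, -1):
--         if content[i].isspace():
--             return i
--
--     return end
-- ===== SOURCE B (Python) =====
-- def _find_good_break_point(content: str, start: int, end: int) -> int:
--     # Single backward scan: return immediately at a sentence ending, remember
--     # the first (highest-index) whitespace seen for the fallback.
--     space = None
--     for i in range(end - 1, start, -1):
--         c = content[i]
--         if c in '.!?\n':
--             return i + 1
--         if space is None and c.isspace():
--             space = i
--     return space if space is not None else end
-- ===== Notes on version B (the rewrite author's own statement) =====
-- stated objective: alternative
-- what changed: B replaces A's two staged backward scans with a single backward pass that returns immediately at the first sentence ending and carries an accumulator remembering the first whitespace index for the fallback.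
import Mathlib
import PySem

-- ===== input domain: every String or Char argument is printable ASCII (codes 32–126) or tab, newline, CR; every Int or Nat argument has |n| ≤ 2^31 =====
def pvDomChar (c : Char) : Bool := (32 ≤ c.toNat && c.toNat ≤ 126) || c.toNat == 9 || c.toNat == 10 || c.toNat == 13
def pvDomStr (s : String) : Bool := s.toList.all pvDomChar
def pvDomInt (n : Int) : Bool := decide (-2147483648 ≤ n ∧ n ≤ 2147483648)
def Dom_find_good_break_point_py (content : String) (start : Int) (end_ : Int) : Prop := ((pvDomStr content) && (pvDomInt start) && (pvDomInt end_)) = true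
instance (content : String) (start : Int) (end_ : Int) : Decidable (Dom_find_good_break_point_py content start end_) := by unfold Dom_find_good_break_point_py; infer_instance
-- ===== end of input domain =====

-- B fuses A's two backward scans into ONE backward scan that exits early on a sentence
-- ending and remembers the first whitespace for the fallback (objective: alternative).

-- ===== PORT A =====
-- content[i]: exact via PySem pyGet? (Python negative-index wraparound included); the
-- default char 'A' is only reached at out-of-range indices, which Pre_ guarantees are
-- never reached before A returns (there Python raises IndexError).
def pvACharAt (cs : List Char) (i : Int) : Char := (PySem.List.pyGet? cs i).getD 'A'

-- c in '.!?\n' for a single character c (exact: membership of a 1-char string)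
def pvASent (c : Char) : Bool := c = '.' || c = '!' || c = '?' || c = '\n'

-- first loop: for i in range(end - 1, start, -1): if content[i] in '.!?\n': return i + 1
-- (n = the number of iterations of the range, i the current index counting down)
def pvAScan1 (cs : List Char) : Nat → Int → Option Int
  | 0, _ => none
  | n + 1, i => if pvASent (pvACharAt cs i) then some i else pvAScan1 cs n (i - 1)

-- second loop: for i in range(end - 1, start, -1): if content[i].isspace(): return i
def pvAScan2 (cs : List Char) : Nat → Int → Option Int
  | 0, _ => none
  | n + 1, i => if PySem.Chars.isspace (pvACharAt cs i) then some i else pvAScan2 cs n (i - 1)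

def find_good_break_point_py (content : String) (start : Int) (end_ : Int) : Int :=
  let cs := content.toList
  let n := (end_ - 1 - start).toNat   -- length of range(end - 1, start, -1)
  match pvAScan1 cs n (end_ - 1) with
  | some i => i + 1
  | none =>
    match pvAScan2 cs n (end_ - 1) with
    | some i => i
    | none => end_

-- ===== PORT B =====
def pvBCharAt (cs : List Char) (i : Int) : Char := (PySem.List.pyGet? cs i).getD 'A'

def pvBSent (c : Char) : Bool := c = '.' || c = '!' || c = '?' || c = '\n'

-- the single backward loop of Source B: early return on a sentence ending, accumulator
-- `space` holds the first whitespace index encountered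
def pvBLoop (cs : List Char) (end_ : Int) : Nat → Int → Option Int → Int
  | 0, _, space =>
      match space with
      | some j => j
      | none => end_
  | n + 1, i, space =>
      let c := pvBCharAt cs i
      if pvBSent c then i + 1
      else pvBLoop cs end_ n (i - 1)
        (if space.isNone && PySem.Chars.isspace c then some i else space)

def find_good_break_point_py_alt (content : String) (start : Int) (end_ : Int) : Int :=
  pvBLoop content.toList end_ ((end_ - 1 - start).toNat) (end_ - 1) none

-- ===== PRECONDITION & SPEC =====
-- Pre_ holds exactly where Python A RETURNS (tested against A): A raises IndexError iff
-- its backward scan reaches an index outside [-len, len) before returning, i.e. unless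
-- the range is empty, or every scanned index is in range, or (when start+1 < -len) a
-- sentence-ending character occurs at some still-valid scanned index.
def pvPreSent (c : Char) : Bool := c = '.' || c = '!' || c = '?' || c = '\n'

def Pre_find_good_break_point_py (content : String) (start : Int) (end_ : Int) : Prop :=
  end_ ≤ start + 1 ∨
    (end_ ≤ (content.toList.length : Int) ∧
      (-(content.toList.length : Int) ≤ start + 1 ∨
        (-(content.toList.length : Int) ≤ end_ - 1 ∧
          (content.toList.take
            (if 0 ≤ end_ then content.toList.length
             else (end_ + (content.toList.length : Int)).toNat)).any pvPreSent = true)))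
instance (content : String) (start : Int) (end_ : Int) : Decidable (Pre_find_good_break_point_py content start end_) := by unfold Pre_find_good_break_point_py; infer_instance

def pvWitness_find_good_break_point_py : String × Int × Int := ("hello world. foo", 0, 15)

def Spec_find_good_break_point_py (content : String) (start : Int) (end_ : Int) (out : Int) : Prop := out = find_good_break_point_py_alt content start end_
instance (content : String) (start : Int) (end_ : Int) (out : Int) : Decidable (Spec_find_good_break_point_py content start end_ out) := by unfold Spec_find_good_break_point_py; infer_instance

-- ===== CLAIM (what is proved, stated in full; the proofs are below) =====
def Claim_equal_find_good_break_point_py : Prop := ∀ (content : String) (start : Int) (end_ : Int), Dom_find_good_break_point_py content start end_ → Pre_find_good_break_point_py content start end_ → Spec_find_good_break_point_py content start end_ (find_good_break_point_py content start end_)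

-- ===== LEMMAS AND PROOFS =====

-- B's fused loop computes A's two staged scans: the first sentence ending wins,
-- otherwise the accumulated first whitespace (or the first one still ahead), else end_.
theorem pvBLoop_eq_scans (cs : List Char) (end_ : Int) :
    ∀ (n : Nat) (i : Int) (space : Option Int),
      pvBLoop cs end_ n i space =
        match pvAScan1 cs n i with
        | some j => j + 1
        | none =>
          match space.or (pvAScan2 cs n i) with
          | some j => j
          | none => end_ := by
  intro n
  induction n with
  | zero => intro i space; cases space <;> simp [pvBLoop, pvAScan1, pvAScan2]
  | succ n ih =>
      intro i space
      by_cases hs : pvASent (pvACharAt cs i)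
      · have hs' : pvBSent (pvBCharAt cs i) = true := by
          simpa [pvASent, pvBSent, pvACharAt, pvBCharAt] using hs
        simp [pvBLoop, pvAScan1, hs, hs']
      · have hs' : pvBSent (pvBCharAt cs i) = false := by
          simpa [pvASent, pvBSent, pvACharAt, pvBCharAt] using hs
      -- step both loops once, then align the whitespace accumulators
        simp only [pvBLoop, pvAScan1, pvAScan2, hs, hs', if_false, Bool.false_eq_true, ih]
        cases space with
        | some s => simp [Option.isNone, Option.or]
        | none =>
            simp only [pvACharAt, pvBCharAt, Option.isNone, Bool.true_and]
            by_cases hw : PySem.Chars.isspace ((PySem.List.pyGet? cs i).getD 'A') <;>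
              simp [hw, Option.or]

-- the two ports are equal on every input (B raises exactly where A raises in Python;
-- the ports totalise both with the same default lookup)
theorem find_good_break_point_py_eq_alt (content : String) (start : Int) (end_ : Int) :
    find_good_break_point_py content start end_ = find_good_break_point_py_alt content start end_ := by
  unfold find_good_break_point_py find_good_break_point_py_alt
  rw [pvBLoop_eq_scans]
  rfl

-- ===== VERDICT (by name: the statement is the Claim_ definition above) =====
theorem find_good_break_point_py_spec : Claim_equal_find_good_break_point_py := by
  intro content start end_ _ _
  unfold Spec_find_good_break_point_py
  exact find_good_break_point_py_eq_alt content start end_
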